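-- pv_equiv track=rewrite | github.com/baoboa/pyqt5 | sip-4.15.3-snapshot-5dc8c370157e/siputils.py | _expand_macro_value
-- ===== SOURCE A (Python) =====
-- import string
--
-- def _expand_macro_value(macros, rhs, properties):
--     """Expand the value of a macro based on ones seen so far."""
--     estart = rhs.find("$$(")
--     mstart = rhs.find("$$")
--
--     while mstart >= 0 and mstart != estart:
--         rstart = mstart + 2
--         if rstart < len(rhs) and rhs[rstart] == "{":
--             rstart = rstart + 1
--             term = "}"
--         elif rstart < len(rhs) and rhs[rstart] == "[":
--             rstart = rstart + 1
--             term = "]"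
--         else:
--             term = string.whitespace
--
--         mend = rstart
--         while mend < len(rhs) and rhs[mend] not in term:
--             mend = mend + 1
--
--         lhs = rhs[rstart:mend]
--
--         if term in "}]":
--             mend = mend + 1
--
--         if term == "]":
--             # Assume a missing property expands to an empty string.
--             if properties is None:
--                 value = ""
--             else:
--                 value = properties.get(lhs, "")
--         else:
--             # We used to treat a missing value as an error, but Qt v4.3.0 has
--             # at least one case that refers to an undefined macro.  If qmake
--             # handles it then this must be the correct behaviour.
--             value = macros.get(lhs, "")
--
--         rhs = rhs[:mstart] + value + rhs[mend:]
--         estart = rhs.find("$$(")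
--         mstart = rhs.find("$$")
--
--     return rhs
-- ===== SOURCE B (Python) =====
-- import string
--
--
-- def _expand_macro_value(macros, rhs, properties):
--     """Expand the value of a macro based on ones seen so far.
--
--     Character-at-a-time scan: plain characters are moved into an output list
--     one by one and never looked at again; a "$$" reference is parsed with a
--     split-at-first-stop-character helper and its value is pushed back onto
--     the remaining buffer.  "$$(" stops the whole expansion, as in qmake.
--     """
--     out = []
--     rem = rhs
--     while rem:
--         if rem.startswith("$$"):
--             if rem.startswith("$$("):
--                 break
--             body = rem[2:]
--             if body.startswith("{"):
--                 lhs, rest = _split_term(body[1:], lambda c: c == "}")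
--                 rem = macros.get(lhs, "") + rest[1:]
--             elif body.startswith("["):
--                 lhs, rest = _split_term(body[1:], lambda c: c == "]")
--                 if properties is None:
--                     rem = rest[1:]
--                 else:
--                     rem = properties.get(lhs, "") + rest[1:]
--             else:
--                 lhs, rest = _split_term(body, lambda c: c in string.whitespace)
--                 rem = macros.get(lhs, "") + rest
--         else:
--             out.append(rem[0])
--             rem = rem[1:]
--     out.append(rem)
--     return "".join(out)
--
--
-- def _split_term(s, stop):
--     """Split s at its first character satisfying stop: (before, from there on)."""
--     for i, c in enumerate(s):
--         if stop(c):
--             return s[:i], s[i:]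
--     return s, ""
-- ===== Notes on version B (the rewrite author's own statement) =====
-- stated objective: alternative
-- what changed: A repeatedly rebuilds the whole string and rescans it from index 0 with find() after every substitution; B is a character-at-a-time scan that moves finished characters into an output list exactly once, parses each $$-term with a split-at-first-stop-character helper, and pushes only the expanded value back onto the remaining buffer (not claimed faster: Python string slicing makes B's per-character step O(n)).
import Mathlib
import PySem

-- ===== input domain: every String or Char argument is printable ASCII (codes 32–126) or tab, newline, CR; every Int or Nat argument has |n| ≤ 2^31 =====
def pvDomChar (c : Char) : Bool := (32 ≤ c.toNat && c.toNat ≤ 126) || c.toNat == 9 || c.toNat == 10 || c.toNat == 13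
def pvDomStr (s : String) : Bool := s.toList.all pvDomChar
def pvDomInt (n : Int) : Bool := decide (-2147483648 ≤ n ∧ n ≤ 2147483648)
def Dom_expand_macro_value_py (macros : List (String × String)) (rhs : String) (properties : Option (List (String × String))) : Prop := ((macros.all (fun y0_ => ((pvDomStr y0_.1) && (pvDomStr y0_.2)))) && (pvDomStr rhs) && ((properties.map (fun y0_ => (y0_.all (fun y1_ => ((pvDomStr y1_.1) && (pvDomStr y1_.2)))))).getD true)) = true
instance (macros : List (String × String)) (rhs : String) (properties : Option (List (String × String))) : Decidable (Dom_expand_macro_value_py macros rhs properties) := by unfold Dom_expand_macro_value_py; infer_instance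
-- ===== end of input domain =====

-- B replaces A's rebuild-whole-string-and-rescan-from-0 loop by a character-at-a-time scan with an
-- output accumulator, a split-at-first-stop-char helper, and value pushback (objective: alternative
-- decomposition; equal return values proved below).


-- ===== PORT A =====
-- string.whitespace (membership-tested only, so the order of characters is irrelevant)
def pvWhitespaceA : List Char := [' ', '\t', '\n', '\r', '\x0b', '\x0c']

-- Python:  while mend < len(rhs) and rhs[mend] not in term: mend += 1   (returns the final mend)
def pvA_scanEnd (rhs term : List Char) (mend : Nat) : Nat :=
  match h : rhs[mend]? with
  | some c => if term.contains c then mend else pvA_scanEnd rhs term (mend + 1)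
  | none => mend
termination_by rhs.length - mend
decreasing_by
  have : mend < rhs.length := (List.getElem?_eq_some_iff.mp h).1
  omega

-- A's `while mstart >= 0 and mstart != estart` loop, transliterated step for step.  The Python loop
-- can diverge (a macro value reintroducing "$$"), so the port carries a fuel argument; on fuel
-- exhaustion the current rhs is returned.  Both ports receive the same (very generous) fuel and the
-- equivalence below is proved for EVERY fuel (pv_main), so it is independent of this choice.
def pvA_loop (macros : List (String × String)) (properties : Option (List (String × String))) : Nat → List Char → List Char
  | 0, rhs => rhs
  | fuel + 1, rhs =>
    let estart := PySem.Chars.find rhs ['$', '$', '(']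
    let mstart := PySem.Chars.find rhs ['$', '$']
    if 0 ≤ mstart ∧ mstart ≠ estart then
      let m := mstart.toNat
      let rt : Nat × List Char :=
        if rhs[m + 2]? = some '{' then (m + 3, ['}'])           -- rstart < len(rhs) and rhs[rstart] == "{"
        else if rhs[m + 2]? = some '[' then (m + 3, [']'])
        else (m + 2, pvWhitespaceA)
      let rstart := rt.1
      let term := rt.2
      let mend0 := pvA_scanEnd rhs term rstart
      let lhs := (rhs.take mend0).drop rstart                    -- rhs[rstart:mend], 0 ≤ rstart ≤ mend ≤ len
      let mend := if term = ['}'] ∨ term = [']'] then mend0 + 1 else mend0   -- `term in "}]"`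
      let value : String :=
        if term = [']'] then
          match properties with
          | none => ""
          | some props => PySem.Dict.getD (PySem.Dict.mk props) (String.ofList lhs) ""
        else PySem.Dict.getD (PySem.Dict.mk macros) (String.ofList lhs) ""
      pvA_loop macros properties fuel (rhs.take m ++ value.toList ++ rhs.drop mend)
    else rhs

def pvFuelA (macros : List (String × String)) (rhs : String) (properties : Option (List (String × String))) : Nat :=
  (rhs.toList.count '$' + (macros.map (fun kv => kv.2.toList.count '$')).sum
      + (((properties.getD []).map (fun kv => kv.2.toList.count '$')).sum) + 2)
    ^ (macros.length + (properties.getD []).length + 2)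

def expand_macro_value_py (macros : List (String × String)) (rhs : String) (properties : Option (List (String × String))) : String :=
  String.ofList (pvA_loop macros properties (pvFuelA macros rhs properties) rhs.toList)

-- ===== PORT B =====
-- `c in string.whitespace`, as Source B's lambda tests it
def pvWs (c : Char) : Bool := c == ' ' || c == '\t' || c == '\n' || c == '\x0b' || c == '\x0c' || c == '\r'

-- Source B's _split_term: split at the first character satisfying `stop`
def pvB_split (stop : Char → Bool) : List Char → List Char × List Char
  | [] => ([], [])
  | c :: rest =>
    if stop c then ([], c :: rest)
    else
      let p := pvB_split stop rest
      (c :: p.1, p.2)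

-- the body of Source B's `if rem.startswith("$$")` branch: parse one term and build the new buffer
def pvB_subst (macros : List (String × String)) (properties : Option (List (String × String))) (body : List Char) : List Char :=
  if body.head? = some '{' then
    let p := pvB_split (fun c => c == '}') (body.drop 1)
    (PySem.Dict.getD (PySem.Dict.mk macros) (String.ofList p.1) "").toList ++ p.2.drop 1
  else if body.head? = some '[' then
    let p := pvB_split (fun c => c == ']') (body.drop 1)
    (match properties with
     | none => []
     | some props => (PySem.Dict.getD (PySem.Dict.mk props) (String.ofList p.1) "").toList) ++ p.2.drop 1
  else
    let p := pvB_split pvWs body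
    (PySem.Dict.getD (PySem.Dict.mk macros) (String.ofList p.1) "").toList ++ p.2

-- Source B's `while rem` loop: `out` is the accumulated output (flattened), `rem` the remaining buffer.
-- Plain characters are consumed structurally; only a substitution consumes fuel (same fuel artefact
-- as port A — Source B diverges on exactly the inputs A's loop diverges on; equality holds for every fuel).
def pvB_go (macros : List (String × String)) (properties : Option (List (String × String))) (fuel : Nat) (out rem : List Char) : List Char :=
  if _hnil : rem = [] then out
  else if ['$', '$'] <+: rem then
    if ['$', '$', '('] <+: rem then out ++ rem                   -- break; out.append(rem); join
    else
      match fuel with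
      | 0 => out ++ rem
      | fuel + 1 => pvB_go macros properties fuel out (pvB_subst macros properties (rem.drop 2))
  else pvB_go macros properties fuel (out ++ rem.take 1) (rem.drop 1)   -- out.append(rem[0]); rem = rem[1:]
termination_by (fuel, rem.length)
decreasing_by
  · exact Prod.Lex.left _ _ (Nat.lt_succ_self fuel)
  · apply Prod.Lex.right
    have : rem.length ≠ 0 := fun h0 => _hnil (List.eq_nil_of_length_eq_zero h0)
    simp
    omega

def pvFuelB (macros : List (String × String)) (rhs : String) (properties : Option (List (String × String))) : Nat :=
  (rhs.toList.count '$' + (macros.map (fun kv => kv.2.toList.count '$')).sum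
      + (((properties.getD []).map (fun kv => kv.2.toList.count '$')).sum) + 2)
    ^ (macros.length + (properties.getD []).length + 2)

def expand_macro_value_py_alt (macros : List (String × String)) (rhs : String) (properties : Option (List (String × String))) : String :=
  String.ofList (pvB_go macros properties (pvFuelB macros rhs properties) [] rhs.toList)

-- ===== PRECONDITION & SPEC =====
def Spec_expand_macro_value_py (macros : List (String × String)) (rhs : String) (properties : Option (List (String × String))) (out : String) : Prop := out = expand_macro_value_py_alt macros rhs properties
instance (macros : List (String × String)) (rhs : String) (properties : Option (List (String × String))) (out : String) : Decidable (Spec_expand_macro_value_py macros rhs properties out) := by unfold Spec_expand_macro_value_py; infer_instance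

-- ===== CLAIM (what is proved, stated in full; the proofs are below) =====
def Claim_equal_expand_macro_value_py : Prop := ∀ (macros : List (String × String)) (rhs : String) (properties : Option (List (String × String))), Dom_expand_macro_value_py macros rhs properties → Spec_expand_macro_value_py macros rhs properties (expand_macro_value_py macros rhs properties)

-- ===== LEMMAS AND PROOFS =====

def pvOcc (L : List Char) (j : Nat) : Prop := L[j]? = some '$' ∧ L[j+1]? = some '$'

theorem pv_prefix_drop_iff (L : List Char) (j : Nat) :
    (['$', '$'] <+: L.drop j) ↔ pvOcc L j := by
  constructor
  · rintro ⟨u, hu⟩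
    have h0 : (L.drop j)[0]? = some '$' := by rw [← hu]; rfl
    have h1 : (L.drop j)[1]? = some '$' := by rw [← hu]; rfl
    rw [List.getElem?_drop] at h0 h1
    exact ⟨h0, h1⟩
  · rintro ⟨h0, h1⟩
    have hj : j < L.length := (List.getElem?_eq_some_iff.mp h0).1
    have hj1 : j + 1 < L.length := (List.getElem?_eq_some_iff.mp h1).1
    rw [List.drop_eq_getElem_cons hj, List.drop_eq_getElem_cons hj1]
    have e0 : L[j] = '$' := (List.getElem?_eq_some_iff.mp h0).2
    have e1 : L[j+1] = '$' := (List.getElem?_eq_some_iff.mp h1).2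
    rw [e0, e1]
    exact ⟨L.drop (j+1+1), rfl⟩

theorem pv_find_eq_neg_one_iff' (L sub : List Char) :
    PySem.Chars.find L sub = -1 ↔ ∀ j, ¬ sub <+: L.drop j := by
  rw [PySem.Chars.find_eq_neg_one_iff]
  rw [← PySem.Chars.isIn_iff_infix, ← PySem.Chars.exists_prefix_drop_iff_isIn]
  push Not
  rfl

theorem pv_find_spec' (L sub : List Char) (k : Nat) (h : PySem.Chars.find L sub = (k : Int)) :
    sub <+: L.drop k ∧ ∀ j < k, ¬ sub <+: L.drop j := by
  have h0 : 0 ≤ PySem.Chars.find L sub := by rw [h]; exact Int.natCast_nonneg k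
  have hs := PySem.Chars.find_spec (s := L) (sub := sub) h0
  rw [h] at hs
  simp only [Int.toNat_natCast] at hs
  exact ⟨hs.1, fun j hj => hs.2 j hj⟩

theorem pv_find_eq_of (L sub : List Char) (k : Nat) (h1 : sub <+: L.drop k)
    (h2 : ∀ j < k, ¬ sub <+: L.drop j) : PySem.Chars.find L sub = (k : Int) := by
  have hnn : 0 ≤ PySem.Chars.find L sub := by
    rw [PySem.Chars.find_nonneg_iff, ← PySem.Chars.isIn_iff_infix,
      ← PySem.Chars.exists_prefix_drop_iff_isIn]
    exact ⟨k, h1⟩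
  have hs := PySem.Chars.find_spec (s := L) (sub := sub) hnn
  have hle : (PySem.Chars.find L sub).toNat ≤ k := by
    by_contra hlt
    exact hs.2 k (by omega) h1
  have hge : k ≤ (PySem.Chars.find L sub).toNat := by
    by_contra hlt
    exact h2 _ (by omega) hs.1
  omega

-- find shifts across a prefix p that contains no occurrence of sub (sub begins with "$$")
theorem pv_find_shift (p X sub : List Char) (hno : ∀ j < p.length, ¬ sub <+: (p ++ X).drop j) :
    PySem.Chars.find (p ++ X) sub =
      if PySem.Chars.find X sub = -1 then -1 else (p.length : Int) + PySem.Chars.find X sub := by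
  by_cases h : PySem.Chars.find X sub = -1
  · rw [h, if_pos rfl]
    rw [pv_find_eq_neg_one_iff'] at h ⊢
    intro j hs
    by_cases hj : j < p.length
    · exact hno j hj hs
    · obtain ⟨i, rfl⟩ : ∃ i, j = p.length + i := ⟨j - p.length, by omega⟩
      rw [List.drop_length_add_append] at hs
      exact h i hs
  · rw [if_neg h]
    have hnn : 0 ≤ PySem.Chars.find X sub := by
      have := PySem.Chars.neg_one_le_find (s := X) (sub := sub)
      rcases Int.lt_or_le (PySem.Chars.find X sub) 0 with h' | h'
      · exact absurd (by omega : PySem.Chars.find X sub = -1) h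
      · exact h'
    obtain ⟨k, hk⟩ : ∃ k : Nat, PySem.Chars.find X sub = (k : Int) := ⟨_, (Int.toNat_of_nonneg hnn).symm⟩
    obtain ⟨hocc, hmin⟩ := pv_find_spec' X sub k hk
    rw [hk]
    have : PySem.Chars.find (p ++ X) sub = ((p.length + k : Nat) : Int) := by
      apply pv_find_eq_of
      · rw [List.drop_length_add_append]; exact hocc
      · intro j hj hs
        by_cases hjp : j < p.length
        · exact hno j hjp hs
        · obtain ⟨i, rfl⟩ : ∃ i, j = p.length + i := ⟨j - p.length, by omega⟩
          rw [List.drop_length_add_append] at hs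
          exact hmin i (by omega) hs
    rw [this]; push_cast; ring

-- step-characterisation helpers for A's loop body (proof-side only)
def pvRt (X : List Char) (m : Nat) : Nat × List Char :=
  if X[m + 2]? = some '{' then (m + 3, ['}'])
  else if X[m + 2]? = some '[' then (m + 3, [']'])
  else (m + 2, pvWhitespaceA)

def pvM0 (X : List Char) (m : Nat) : Nat := pvA_scanEnd X (pvRt X m).2 (pvRt X m).1

def pvMendF (X : List Char) (m : Nat) : Nat :=
  if (pvRt X m).2 = ['}'] ∨ (pvRt X m).2 = [']'] then pvM0 X m + 1 else pvM0 X m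

def pvLhsF (X : List Char) (m : Nat) : List Char := (X.take (pvM0 X m)).drop (pvRt X m).1

def pvValF (macros : List (String × String)) (properties : Option (List (String × String)))
    (X : List Char) (m : Nat) : String :=
  if (pvRt X m).2 = [']'] then
    match properties with
    | none => ""
    | some props => PySem.Dict.getD (PySem.Dict.mk props) (String.ofList (pvLhsF X m)) ""
  else PySem.Dict.getD (PySem.Dict.mk macros) (String.ofList (pvLhsF X m)) ""

theorem pvA_loop_succ_step (macros : List (String × String)) (properties : Option (List (String × String)))
    (fuel : Nat) (X : List Char) (m : Nat) (hm : PySem.Chars.find X ['$', '$'] = (m : Int))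
    (hne : PySem.Chars.find X ['$', '$', '('] ≠ (m : Int)) :
    pvA_loop macros properties (fuel + 1) X =
      pvA_loop macros properties fuel
        (X.take m ++ (pvValF macros properties X m).toList ++ X.drop (pvMendF X m)) := by
  simp only [pvA_loop]
  rw [hm, if_pos ⟨Int.natCast_nonneg m, fun h => hne h.symm⟩]
  simp only [Int.toNat_natCast, pvValF, pvMendF, pvLhsF, pvM0, pvRt]

theorem pvA_loop_succ_stop (macros : List (String × String)) (properties : Option (List (String × String)))
    (fuel : Nat) (X : List Char)
    (h : ¬ (0 ≤ PySem.Chars.find X ['$', '$'] ∧ PySem.Chars.find X ['$', '$'] ≠ PySem.Chars.find X ['$', '$', '('])) :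
    pvA_loop macros properties (fuel + 1) X = X := by
  simp only [pvA_loop]
  rw [if_neg h]

theorem pvRt_shift (p X : List Char) (m : Nat) :
    pvRt (p ++ X) (p.length + m) = (p.length + (pvRt X m).1, (pvRt X m).2) := by
  unfold pvRt
  rw [show p.length + m + 2 = p.length + (m + 2) from by omega,
    List.getElem?_append_right (by omega), Nat.add_sub_cancel_left]
  split_ifs <;> simp [Prod.ext_iff] <;> omega

theorem pv_scanEnd_shift (p X term : List Char) (r : Nat) :
    pvA_scanEnd (p ++ X) term (p.length + r) = p.length + pvA_scanEnd X term r := by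
  fun_induction pvA_scanEnd X term r with
  | case1 r c h ht =>
    rw [pvA_scanEnd, List.getElem?_append_right (by omega), Nat.add_sub_cancel_left, h]
    simp [show c ∈ term by simpa using ht]
  | case2 r c h ht ih =>
    rw [pvA_scanEnd, List.getElem?_append_right (by omega), Nat.add_sub_cancel_left, h]
    have h1 : p.length + r + 1 = p.length + (r + 1) := by omega
    simp [show c ∉ term by simpa using ht, h1, ih]
  | case3 r h =>
    rw [pvA_scanEnd, List.getElem?_append_right (by omega), Nat.add_sub_cancel_left, h]

theorem pvM0_shift (p X : List Char) (m : Nat) :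
    pvM0 (p ++ X) (p.length + m) = p.length + pvM0 X m := by
  unfold pvM0
  rw [pvRt_shift]
  exact pv_scanEnd_shift p X (pvRt X m).2 (pvRt X m).1

theorem pvMendF_shift (p X : List Char) (m : Nat) :
    pvMendF (p ++ X) (p.length + m) = p.length + pvMendF X m := by
  unfold pvMendF
  rw [pvRt_shift, pvM0_shift]
  split_ifs <;> omega

theorem pvLhsF_shift (p X : List Char) (m : Nat) :
    pvLhsF (p ++ X) (p.length + m) = pvLhsF X m := by
  unfold pvLhsF
  rw [pvRt_shift, pvM0_shift, List.take_length_add_append, List.drop_length_add_append]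

theorem pvValF_shift (macros : List (String × String)) (properties : Option (List (String × String)))
    (p X : List Char) (m : Nat) :
    pvValF macros properties (p ++ X) (p.length + m) = pvValF macros properties X m := by
  unfold pvValF
  rw [pvRt_shift, pvLhsF_shift]

-- scanEnd is "skip the longest prefix avoiding term"
theorem pv_scanEnd_takeWhile (X term : List Char) (r : Nat) :
    pvA_scanEnd X term r = r + ((X.drop r).takeWhile (fun c => !(term.contains c))).length := by
  fun_induction pvA_scanEnd X term r with
  | case1 r c h ht =>
    have hd : X.drop r = c :: X.drop (r + 1) := by
      rw [List.drop_eq_getElem_cons (List.getElem?_eq_some_iff.mp h).1]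
      simp [(List.getElem?_eq_some_iff.mp h).2]
    rw [hd, List.takeWhile_cons_of_neg (by simpa using ht)]
    simp
  | case2 r c h ht ih =>
    have hd : X.drop r = c :: X.drop (r + 1) := by
      rw [List.drop_eq_getElem_cons (List.getElem?_eq_some_iff.mp h).1]
      simp [(List.getElem?_eq_some_iff.mp h).2]
    rw [ih, hd, List.takeWhile_cons_of_pos (by simpa using ht)]
    simp
    omega
  | case3 r h =>
    have hd : X.drop r = [] := List.drop_eq_nil_of_le (List.getElem?_eq_none_iff.mp h)
    rw [hd]
    simp

-- Source B's _split_term is (takeWhile, dropWhile) of the negated predicate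
theorem pvB_split_eq (stop : Char → Bool) (l : List Char) :
    pvB_split stop l = (l.takeWhile (fun c => !(stop c)), l.dropWhile (fun c => !(stop c))) := by
  induction l with
  | nil => rfl
  | cons c rest ih =>
    by_cases h : stop c
    · simp [pvB_split, h]
    · simp [pvB_split, h, ih]

theorem pv_take_len_takeWhile (P : Char → Bool) (l : List Char) :
    l.take (l.takeWhile P).length = l.takeWhile P :=
  ((List.prefix_iff_eq_take).mp (List.takeWhile_prefix P)).symm

theorem pv_drop_len_takeWhile (P : Char → Bool) (l : List Char) :
    l.drop (l.takeWhile P).length = l.dropWhile P := by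
  have h : (l.takeWhile P ++ l.dropWhile P).drop (l.takeWhile P).length = l.dropWhile P :=
    List.drop_left ..
  rw [List.takeWhile_append_dropWhile] at h
  exact h

-- value selection, split by which terminator pvRt chose
theorem pvValF_macro (macros : List (String × String)) (properties : Option (List (String × String)))
    (X : List Char) (m : Nat) (h : (pvRt X m).2 ≠ [']']) :
    pvValF macros properties X m
      = PySem.Dict.getD (PySem.Dict.mk macros) (String.ofList (pvLhsF X m)) "" := by
  unfold pvValF
  rw [if_neg h]

theorem pvValF_prop (macros : List (String × String)) (properties : Option (List (String × String)))
    (X : List Char) (m : Nat) (h : (pvRt X m).2 = [']']) :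
    pvValF macros properties X m
      = (match properties with
         | none => ""
         | some props => PySem.Dict.getD (PySem.Dict.mk props) (String.ofList (pvLhsF X m)) "") := by
  unfold pvValF
  rw [if_pos h]

-- B's one-step substitution is exactly A's loop-body rewrite at position 0
theorem pvB_subst_eq (macros : List (String × String)) (properties : Option (List (String × String)))
    (body : List Char) :
    pvB_subst macros properties body =
      (pvValF macros properties ('$' :: '$' :: body) 0).toList
        ++ ('$' :: '$' :: body).drop (pvMendF ('$' :: '$' :: body) 0) := by
  by_cases hb : body.head? = some '{'
  · obtain ⟨b, rfl⟩ : ∃ b, body = '{' :: b := by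
      cases body with
      | nil => simp at hb
      | cons c rest =>
        have hc : c = '{' := by simpa using hb
        exact ⟨rest, by rw [hc]⟩
    have hrt : pvRt ('$' :: '$' :: '{' :: b) 0 = (3, ['}']) := by
      simp [pvRt]
    have hpred : (fun c => !(List.contains ['}'] c)) = (fun c => !(c == '}')) := by
      funext c
      by_cases h : c = '}' <;> simp [h]
    have hm0 : pvM0 ('$' :: '$' :: '{' :: b) 0
        = 3 + (b.takeWhile (fun c => !(c == '}'))).length := by
      rw [pvM0, hrt, pv_scanEnd_takeWhile, hpred]
      simp only [List.drop_succ_cons, List.drop_zero]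
    have hmend : pvMendF ('$' :: '$' :: '{' :: b) 0
        = 3 + (b.takeWhile (fun c => !(c == '}'))).length + 1 := by
      rw [pvMendF, hrt, hm0]; simp
    have hlhs : pvLhsF ('$' :: '$' :: '{' :: b) 0 = b.takeWhile (fun c => !(c == '}')) := by
      rw [pvLhsF, hrt, hm0, List.drop_take]
      simp only [Nat.add_sub_cancel_left, List.drop_succ_cons, List.drop_zero]
      exact pv_take_len_takeWhile _ b
    have hdrop : ('$' :: '$' :: '{' :: b).drop (pvMendF ('$' :: '$' :: '{' :: b) 0)
        = (b.dropWhile (fun c => !(c == '}'))).drop 1 := by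
      rw [hmend]
      rw [show 3 + (b.takeWhile (fun c => !(c == '}'))).length + 1
          = 3 + ((b.takeWhile (fun c => !(c == '}'))).length + 1) from by omega, ← List.drop_drop]
      simp only [List.drop_succ_cons, List.drop_zero]
      rw [← List.drop_drop, pv_drop_len_takeWhile]
    rw [pvB_subst]
    simp only [List.head?_cons, Option.some.injEq, reduceIte, List.drop_succ_cons, List.drop_zero]
    rw [pvB_split_eq, pvValF_macro _ _ _ _ (by rw [hrt]; decide), hlhs, hdrop]
  · by_cases hb2 : body.head? = some '['
    · obtain ⟨b, rfl⟩ : ∃ b, body = '[' :: b := by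
        cases body with
        | nil => simp at hb2
        | cons c rest =>
          have hc : c = '[' := by simpa using hb2
          exact ⟨rest, by rw [hc]⟩
      have hrt : pvRt ('$' :: '$' :: '[' :: b) 0 = (3, [']']) := by
        simp [pvRt]
      have hpred : (fun c => !(List.contains [']'] c)) = (fun c => !(c == ']')) := by
        funext c
        by_cases h : c = ']' <;> simp [h]
      have hm0 : pvM0 ('$' :: '$' :: '[' :: b) 0
          = 3 + (b.takeWhile (fun c => !(c == ']'))).length := by
        rw [pvM0, hrt, pv_scanEnd_takeWhile, hpred]
        simp only [List.drop_succ_cons, List.drop_zero]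
      have hmend : pvMendF ('$' :: '$' :: '[' :: b) 0
          = 3 + (b.takeWhile (fun c => !(c == ']'))).length + 1 := by
        rw [pvMendF, hrt, hm0]; simp
      have hlhs : pvLhsF ('$' :: '$' :: '[' :: b) 0 = b.takeWhile (fun c => !(c == ']')) := by
        rw [pvLhsF, hrt, hm0, List.drop_take]
        simp only [Nat.add_sub_cancel_left, List.drop_succ_cons, List.drop_zero]
        exact pv_take_len_takeWhile _ b
      have hdrop : ('$' :: '$' :: '[' :: b).drop (pvMendF ('$' :: '$' :: '[' :: b) 0)
          = (b.dropWhile (fun c => !(c == ']'))).drop 1 := by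
        rw [hmend]
        rw [show 3 + (b.takeWhile (fun c => !(c == ']'))).length + 1
            = 3 + ((b.takeWhile (fun c => !(c == ']'))).length + 1) from by omega, ← List.drop_drop]
        simp only [List.drop_succ_cons, List.drop_zero]
        rw [← List.drop_drop, pv_drop_len_takeWhile]
      rw [pvB_subst]
      simp only [List.head?_cons, Option.some.injEq, reduceIte, List.drop_succ_cons, List.drop_zero]
      rw [pvB_split_eq, pvValF_prop _ _ _ _ (by rw [hrt]), hlhs, hdrop]
      cases properties <;> simp [pvB_split_eq]
    · -- whitespace-terminated term
      have hrt : pvRt ('$' :: '$' :: body) 0 = (2, pvWhitespaceA) := by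
        rw [pvRt, show ('$' :: '$' :: body)[0 + 2]? = body[0]? from rfl]
        cases body with
        | nil => simp
        | cons c rest =>
          simp only [List.head?_cons, Option.some.injEq] at hb hb2
          simp [hb, hb2]
      have hpred : (fun c => !(List.contains pvWhitespaceA c)) = (fun c => !(pvWs c)) := by
        funext c
        simp only [pvWhitespaceA, pvWs]
        rw [Bool.eq_iff_iff]
        simp
        tauto
      have hm0 : pvM0 ('$' :: '$' :: body) 0 = 2 + (body.takeWhile (fun c => !(pvWs c))).length := by
        rw [pvM0, hrt, pv_scanEnd_takeWhile, hpred]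
        simp only [List.drop_succ_cons, List.drop_zero]
      have hterm1 : ¬ (pvWhitespaceA = ['}'] ∨ pvWhitespaceA = [']']) := by decide
      have hmend : pvMendF ('$' :: '$' :: body) 0
          = 2 + (body.takeWhile (fun c => !(pvWs c))).length := by
        rw [pvMendF, hrt, if_neg hterm1, hm0]
      have hlhs : pvLhsF ('$' :: '$' :: body) 0 = body.takeWhile (fun c => !(pvWs c)) := by
        rw [pvLhsF, hrt, hm0, List.drop_take]
        simp only [Nat.add_sub_cancel_left, List.drop_succ_cons, List.drop_zero]
        exact pv_take_len_takeWhile _ body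
      have hdrop : ('$' :: '$' :: body).drop (pvMendF ('$' :: '$' :: body) 0)
          = body.dropWhile (fun c => !(pvWs c)) := by
        rw [hmend, ← List.drop_drop]
        simp only [List.drop_succ_cons, List.drop_zero]
        rw [pv_drop_len_takeWhile]
      rw [pvB_subst, if_neg hb, if_neg hb2]
      rw [pvB_split_eq, pvValF_macro _ _ _ _ (by rw [hrt]; decide), hlhs, hdrop]

-- the "$$" prefix test, in occurrence form
theorem pv_prefix_cons_iff (L : List Char) :
    (['$', '$'] <+: L) ↔ L[0]? = some '$' ∧ L[1]? = some '$' := by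
  have := pv_prefix_drop_iff L 0
  simpa [pvOcc] using this

-- A's loop leaves the empty string alone
theorem pvA_loop_nil (macros : List (String × String)) (properties : Option (List (String × String)))
    (fuel : Nat) : pvA_loop macros properties fuel [] = [] := by
  cases fuel with
  | zero => rfl
  | succ fuel =>
    apply pvA_loop_succ_stop
    have : PySem.Chars.find ([] : List Char) ['$', '$'] = -1 := by decide
    rw [this]; omega

-- A's loop stops immediately on a leading "$$("
theorem pvA_loop_paren (macros : List (String × String)) (properties : Option (List (String × String)))
    (fuel : Nat) (rem : List Char) (h : ['$', '$', '('] <+: rem) :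
    pvA_loop macros properties fuel rem = rem := by
  cases fuel with
  | zero => rfl
  | succ fuel =>
    apply pvA_loop_succ_stop
    have h2 : ['$', '$'] <+: rem := List.IsPrefix.trans ⟨['('], rfl⟩ h
    have e2 : PySem.Chars.find rem ['$', '$'] = ((0 : Nat) : Int) :=
      pv_find_eq_of rem _ 0 (by simpa using h2) (by omega)
    have e3 : PySem.Chars.find rem ['$', '$', '('] = ((0 : Nat) : Int) :=
      pv_find_eq_of rem _ 0 (by simpa using h) (by omega)
    rw [e2, e3]; omega

-- A's step on a string with a leading "$$" (not "$$(") is B's pushback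
theorem pvA_loop_step0 (macros : List (String × String)) (properties : Option (List (String × String)))
    (fuel : Nat) (rem : List Char) (h2 : ['$', '$'] <+: rem) (h3 : ¬ ['$', '$', '('] <+: rem) :
    pvA_loop macros properties (fuel + 1) rem =
      pvA_loop macros properties fuel (pvB_subst macros properties (rem.drop 2)) := by
  obtain ⟨body, hbody⟩ := h2
  have hrem : rem = '$' :: '$' :: body := by rw [← hbody]; rfl
  subst hrem
  have e2 : PySem.Chars.find ('$' :: '$' :: body) ['$', '$'] = ((0 : Nat) : Int) :=
    pv_find_eq_of _ _ 0 (by simp) (by omega)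
  have e3 : PySem.Chars.find ('$' :: '$' :: body) ['$', '$', '('] ≠ ((0 : Nat) : Int) := by
    intro h
    obtain ⟨hp, -⟩ := pv_find_spec' _ _ 0 h
    exact h3 (by simpa using hp)
  rw [pvA_loop_succ_step macros properties fuel _ 0 e2 e3, pvB_subst_eq]
  simp

-- A's loop commutes with a leading character that does not start a "$$"
theorem pvA_loop_cons (macros : List (String × String)) (properties : Option (List (String × String))) :
    ∀ (fuel : Nat) (c : Char) (rest : List Char), ¬ ['$', '$'] <+: (c :: rest) →
      pvA_loop macros properties fuel (c :: rest) = c :: pvA_loop macros properties fuel rest := by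
  intro fuel
  induction fuel with
  | zero => intro c rest _; rfl
  | succ fuel ih =>
    intro c rest hnp
    have hno : ∀ (sub : List Char), ['$', '$'] <+: sub →
        ∀ j < ([c] : List Char).length, ¬ sub <+: ([c] ++ rest).drop j := by
      intro sub hdd j hj hs
      have hj0 : j = 0 := by simpa using hj
      subst hj0
      exact hnp (hdd.trans (by simpa using hs))
    have hshift2 := pv_find_shift [c] rest ['$', '$'] (hno _ (List.prefix_refl _))
    have hshift3 := pv_find_shift [c] rest ['$', '$', '('] (hno _ ⟨['('], rfl⟩)
    simp only [List.singleton_append, List.length_cons, List.length_nil] at hshift2 hshift3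
    by_cases hneg : PySem.Chars.find rest ['$', '$'] = -1
    · rw [if_pos hneg] at hshift2
      rw [pvA_loop_succ_stop _ _ _ _ (by rw [hshift2]; omega),
        pvA_loop_succ_stop _ _ _ _ (by rw [hneg]; omega)]
    · obtain ⟨m, hm⟩ : ∃ m : Nat, PySem.Chars.find rest ['$', '$'] = (m : Int) := by
        have := PySem.Chars.neg_one_le_find (s := rest) (sub := ['$', '$'])
        exact ⟨(PySem.Chars.find rest ['$', '$']).toNat, by omega⟩
      rw [if_neg hneg, hm] at hshift2
      by_cases heq : PySem.Chars.find rest ['$', '$', '('] = (m : Int)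
      · have h3 : PySem.Chars.find rest ['$', '$', '('] ≠ -1 := by omega
        rw [if_neg h3, heq] at hshift3
        rw [pvA_loop_succ_stop _ _ _ _ (by rw [hshift2, hshift3]; omega),
          pvA_loop_succ_stop _ _ _ _ (by rw [hm, heq]; omega)]
      · have hmP : PySem.Chars.find (c :: rest) ['$', '$'] = ((1 + m : Nat) : Int) := by
          rw [hshift2]; push_cast; ring
        have hneP : PySem.Chars.find (c :: rest) ['$', '$', '('] ≠ ((1 + m : Nat) : Int) := by
          rw [hshift3]
          split_ifs with h3
          · omega
          · obtain ⟨e, he⟩ : ∃ e : Nat, PySem.Chars.find rest ['$', '$', '('] = (e : Int) := by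
              have := PySem.Chars.neg_one_le_find (s := rest) (sub := ['$', '$', '('])
              exact ⟨(PySem.Chars.find rest ['$', '$', '(']).toNat, by omega⟩
            rw [he]
            have : e ≠ m := fun h => heq (by rw [he, h])
            push_cast
            omega
      -- both loops perform one substitution; shift the body computations across [c]
        have hc1 : (c :: rest) = [c] ++ rest := rfl
        have hlen : ([c] : List Char).length = 1 := rfl
        rw [pvA_loop_succ_step macros properties fuel (c :: rest) (1 + m) hmP hneP,
          pvA_loop_succ_step macros properties fuel rest m hm heq]
        rw [hc1, show (1 + m) = ([c] : List Char).length + m from by rw [hlen],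
          pvValF_shift, pvMendF_shift, List.take_length_add_append, List.drop_length_add_append]
        have hrec := ih c (rest.take m ++ (pvValF macros properties rest m).toList
            ++ rest.drop (pvMendF rest m))
        rw [show [c] ++ List.take m rest ++ (pvValF macros properties rest m).toList
              ++ List.drop (pvMendF rest m) rest
            = c :: (List.take m rest ++ (pvValF macros properties rest m).toList
              ++ List.drop (pvMendF rest m) rest) from by simp]
        apply hrec
        -- the new string still does not start with "$$"
        intro hpre
        rw [pv_prefix_cons_iff] at hpre
        obtain ⟨hp0, hp1⟩ := hpre
        simp only [List.getElem?_cons_zero, Option.some.injEq] at hp0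
        have hcr : ¬ (c = '$' ∧ rest[0]? = some '$') := by
          intro ⟨e0, e1⟩
          exact hnp (pv_prefix_cons_iff _ |>.mpr ⟨by simpa using e0, by simpa using e1⟩)
        have hr0 : rest[0]? ≠ some '$' := fun h => hcr ⟨hp0, h⟩
        obtain ⟨hocc, -⟩ := pv_find_spec' rest _ m hm
        rw [pv_prefix_drop_iff] at hocc
        have hm1 : 1 ≤ m := by
          rcases Nat.eq_zero_or_pos m with rfl | h
          · exact absurd hocc.1 hr0
          · omega
        have hmlt : m < rest.length := (List.getElem?_eq_some_iff.mp hocc.1).1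
        have : (List.take m rest ++ (pvValF macros properties rest m).toList
            ++ List.drop (pvMendF rest m) rest)[0]? = rest[0]? := by
          rw [List.append_assoc, List.getElem?_append_left (by simp; omega),
            List.getElem?_take_of_lt (by omega)]
        rw [List.getElem?_cons_succ] at hp1
        exact hr0 (by rw [← this]; exact hp1)

-- main invariant: B's scan with output accumulator equals A's loop, for every fuel
theorem pv_main (macros : List (String × String)) (properties : Option (List (String × String))) :
    ∀ (fuel : Nat) (out rem : List Char),
      pvB_go macros properties fuel out rem = out ++ pvA_loop macros properties fuel rem := by
  intro fuel out rem
  fun_induction pvB_go macros properties fuel out rem with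
  | case1 fuel out =>
    rw [pvA_loop_nil]
    simp
  | case2 fuel out rem h h2 h3 =>
    rw [pvA_loop_paren macros properties fuel rem h3]
  | case3 out rem h h2 h3 =>
    rfl
  | case4 out rem h h2 h3 fuel ih =>
    rw [ih, pvA_loop_step0 macros properties fuel rem h2 h3]
  | case5 fuel out rem h h2 ih =>
    obtain ⟨c, rest, rfl⟩ : ∃ c rest, rem = c :: rest := by
      cases rem with
      | nil => exact absurd rfl h
      | cons c rest => exact ⟨c, rest, rfl⟩
    rw [ih, pvA_loop_cons macros properties fuel c rest h2]
    simp

-- ===== VERDICT (by name: the statement is the Claim_ definition above) =====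
theorem expand_macro_value_py_spec : Claim_equal_expand_macro_value_py := by
  intro macros rhs properties _
  unfold Spec_expand_macro_value_py expand_macro_value_py expand_macro_value_py_alt pvFuelA pvFuelB
  rw [pv_main]
  simp
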